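-- pv_equiv track=rewrite | github.com/huntekah/aoc_2023 | aoc_14/aoc_14_1.py | slide_stones_left
-- ===== SOURCE A (Python) =====
-- Record = list[str]
--
-- def slide_stones_left(record: Record) -> Record:
--     # for symbols .#O, move each O to the rightmost position, if it is not blocked by #
--     stone = "O"
--     block = "#"
--     empty = "."
--     new_record = []
--     for row in record:
--         new_row = []
--         stones = []
--         emptys = []
--         for i, symbol in enumerate(row):
--             if symbol == stone:
--                 stones.append(stone)
--             elif symbol == empty:
--                 emptys.append(empty)
--             elif symbol == block:
--                 new_row.extend([*stones, *emptys, block])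
--                 stones = []
--                 emptys = []
--
--         new_row.extend([*stones, *emptys])
--         new_record.append("".join(new_row))
--     return new_record
-- ===== SOURCE B (Python) =====
-- def slide_stones_left(record):
--     return [
--         "#".join("O" * seg.count("O") + "." * seg.count(".") for seg in row.split("#"))
--         for row in record
--     ]
-- ===== Notes on version B (the rewrite author's own statement) =====
-- stated objective: simpler
-- what changed: Replaces the manual scan that maintains new_row/stones/emptys accumulator lists and flushes them at each '#' with a split('#')/count/rebuild pipeline: each segment becomes 'O'*count('O') + '.'*count('.') and the segments are re-joined with '#'.
import Mathlib
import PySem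

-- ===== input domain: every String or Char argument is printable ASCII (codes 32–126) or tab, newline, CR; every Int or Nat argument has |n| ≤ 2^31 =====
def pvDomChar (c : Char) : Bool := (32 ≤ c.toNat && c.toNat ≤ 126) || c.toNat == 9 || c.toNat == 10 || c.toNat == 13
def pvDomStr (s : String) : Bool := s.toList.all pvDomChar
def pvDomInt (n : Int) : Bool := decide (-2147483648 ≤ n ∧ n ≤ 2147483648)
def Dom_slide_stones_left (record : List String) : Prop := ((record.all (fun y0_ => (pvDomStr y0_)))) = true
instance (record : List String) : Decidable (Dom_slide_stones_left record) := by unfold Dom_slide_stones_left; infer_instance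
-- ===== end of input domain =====

-- B replaces A's manual scan with accumulator lists by a split('#')/count/rebuild/join pipeline; simpler, same cost.

-- ===== PORT A =====
-- one step of A's inner loop: state = (new_row, stones, emptys)
def slideStepA (st : List Char × List Char × List Char) (c : Char) : List Char × List Char × List Char :=
  if c = 'O' then (st.1, st.2.1 ++ ['O'], st.2.2)
  else if c = '.' then (st.1, st.2.1, st.2.2 ++ ['.'])
  else if c = '#' then (st.1 ++ st.2.1 ++ st.2.2 ++ ['#'], [], [])
  else st

def slideRowA_fin (s : List Char × List Char × List Char) : List Char :=
  s.1 ++ s.2.1 ++ s.2.2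

def slideRowA (row : List Char) : List Char :=
  slideRowA_fin (row.foldl slideStepA ([], [], []))

def slide_stones_left (record : List String) : List String :=
  record.foldl (fun acc row => acc ++ [String.mk (slideRowA row.toList)]) []

-- ===== PORT B =====
def segB (s : List Char) : List Char :=
  List.replicate (PySem.Chars.count s ['O']) 'O' ++ List.replicate (PySem.Chars.count s ['.']) '.'

def slideRowB (row : List Char) : List Char :=
  PySem.Chars.join ['#'] ((PySem.Chars.splitOn row ['#']).map segB)

def slide_stones_left_alt (record : List String) : List String :=
  record.map (fun row => String.mk (slideRowB row.toList))

-- ===== PRECONDITION & SPEC =====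
def Spec_slide_stones_left (record : List String) (out : List String) : Prop := out = slide_stones_left_alt record
instance (record : List String) (out : List String) : Decidable (Spec_slide_stones_left record out) := by unfold Spec_slide_stones_left; infer_instance

-- ===== CLAIM (what is proved, stated in full; the proofs are below) =====
def Claim_equal_slide_stones_left : Prop := ∀ (record : List String), Dom_slide_stones_left record → Spec_slide_stones_left record (slide_stones_left record)

-- ===== LEMMAS AND PROOFS =====

-- recursive characterization of Python split('#') on char lists: (first segment, later segments)
def mySplit : List Char → List Char × List (List Char)
  | [] => ([], [])
  | c :: r =>
    let p := mySplit r
    if c = '#' then ([], p.1 :: p.2) else (c :: p.1, p.2)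

-- recursive characterization of A's inner loop with pending counts a (stones) and b (emptys)
def auxAB (a b : Nat) : List Char → List Char
  | [] => List.replicate a 'O' ++ List.replicate b '.'
  | c :: r =>
    if c = 'O' then auxAB (a+1) b r
    else if c = '.' then auxAB a (b+1) r
    else if c = '#' then List.replicate a 'O' ++ List.replicate b '.' ++ '#' :: auxAB 0 0 r
    else auxAB a b r

def segB' (s : List Char) : List Char :=
  List.replicate (s.count 'O') 'O' ++ List.replicate (s.count '.') '.'

def tailJoin : List (List Char) → List Char
  | [] => []
  | s :: t => '#' :: (segB' s ++ tailJoin t)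

theorem count_go_single (c : Char) :
    ∀ (l : List Char) (fuel acc : Nat), l.length ≤ fuel →
      PySem.Chars.count.go [c] fuel l acc = acc + l.count c := by
  intro l
  induction l with
  | nil => intro fuel acc _; cases fuel <;> simp [PySem.Chars.count.go]
  | cons x r ih =>
    intro fuel acc h
    cases fuel with
    | zero => simp at h
    | succ f =>
      by_cases hx : x = c
      · subst hx
        simp only [PySem.Chars.count.go, List.isPrefixOf]
        rw [if_pos (by simp)]
        simp only [List.length_cons, List.length_nil, List.drop_succ_cons, List.drop_zero]
        rw [ih f (acc + 1) (by simpa using h)]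
        simp [List.count_cons]
        omega
      · simp only [PySem.Chars.count.go, List.isPrefixOf]
        rw [if_neg (by simp; exact fun hc => hx hc.symm)]
        rw [ih f acc (by simpa using h)]
        simp [List.count_cons, hx]

theorem chars_count_single (s : List Char) (c : Char) :
    PySem.Chars.count s [c] = s.count c := by
  simp [PySem.Chars.count, count_go_single c s s.length 0 (le_refl _)]

theorem split_go_eq (l : List Char) :
    ∀ (fuel : Nat) (cur : List Char) (acc : List (List Char)), l.length < fuel →
      PySem.Chars.splitOn.go ['#'] fuel l cur acc =
        acc.reverse ++ (cur.reverse ++ (mySplit l).1) :: (mySplit l).2 := by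
  induction l with
  | nil =>
    intro fuel cur acc h
    cases fuel with
    | zero => omega
    | succ f => simp [PySem.Chars.splitOn.go, mySplit]
  | cons x r ih =>
    intro fuel cur acc h
    cases fuel with
    | zero => omega
    | succ f =>
      by_cases hx : x = '#'
      · subst hx
        simp only [PySem.Chars.splitOn.go, List.isPrefixOf, List.isPrefixOf_nil_left]
        rw [if_pos (by simp)]
        simp only [List.length_cons, List.length_nil, List.drop_succ_cons, List.drop_zero]
        rw [ih f [] (cur.reverse :: acc) (by simp at h; omega)]
        simp [mySplit]
      · simp only [PySem.Chars.splitOn.go, List.isPrefixOf]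
        rw [if_neg (by simp; exact fun hc => hx hc.symm)]
        rw [ih f (x :: cur) acc (by simp at h; omega)]
        simp [mySplit, hx]

theorem splitOn_hash (l : List Char) :
    PySem.Chars.splitOn l ['#'] = (mySplit l).1 :: (mySplit l).2 := by
  simp [PySem.Chars.splitOn, split_go_eq l (l.length + 1) [] [] (by omega)]

theorem foldA_eq_aux (l : List Char) :
    ∀ (nr : List Char) (a b : Nat),
      slideRowA_fin (l.foldl slideStepA (nr, List.replicate a 'O', List.replicate b '.')) =
        nr ++ auxAB a b l := by
  induction l with
  | nil => intro nr a b; simp [slideRowA_fin, auxAB]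
  | cons c r ih =>
    intro nr a b
    by_cases hO : c = 'O'
    · subst hO
      simp only [List.foldl_cons, slideStepA, reduceIte]
      rw [← List.replicate_succ', ih nr (a+1) b]
      simp [auxAB]
    · by_cases hD : c = '.'
      · subst hD
        simp only [List.foldl_cons, slideStepA]
        rw [if_neg (by decide), if_pos trivial]
        rw [← List.replicate_succ', ih nr a (b+1)]
        simp [auxAB]
      · by_cases hH : c = '#'
        · subst hH
          simp only [List.foldl_cons, slideStepA]
          rw [if_neg (by decide), if_neg (by decide), if_pos trivial]
          have h := ih (nr ++ List.replicate a 'O' ++ List.replicate b '.' ++ ['#']) 0 0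
          simp only [List.replicate_zero] at h
          rw [h]
          simp [auxAB]
        · simp only [List.foldl_cons, slideStepA]
          rw [if_neg hO, if_neg hD, if_neg hH, ih nr a b]
          simp [auxAB, hO, hD, hH]

theorem aux_eq_split (l : List Char) :
    ∀ (a b : Nat),
      auxAB a b l =
        List.replicate (a + (mySplit l).1.count 'O') 'O' ++
        List.replicate (b + (mySplit l).1.count '.') '.' ++ tailJoin (mySplit l).2 := by
  induction l with
  | nil => intro a b; simp [auxAB, mySplit, tailJoin]
  | cons c r ih =>
    intro a b
    by_cases hO : c = 'O'
    · subst hO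
      simp only [auxAB, reduceIte]
      rw [ih (a+1) b]
      have h1 : a + 1 + (mySplit r).1.count 'O' = a + (mySplit ('O' :: r)).1.count 'O' := by
        simp [mySplit, List.count_cons]; omega
      have h2 : (mySplit r).1.count '.' = (mySplit ('O' :: r)).1.count '.' := by
        simp [mySplit, List.count_cons]
      have h3 : (mySplit r).2 = (mySplit ('O' :: r)).2 := by simp [mySplit]
      rw [h1, h2, h3]
    · by_cases hD : c = '.'
      · subst hD
        simp only [auxAB]
        rw [if_neg (by decide), if_pos trivial]
        rw [ih a (b+1)]
        have h1 : (mySplit r).1.count 'O' = (mySplit ('.' :: r)).1.count 'O' := by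
          simp [mySplit, List.count_cons]
        have h2 : b + 1 + (mySplit r).1.count '.' = b + (mySplit ('.' :: r)).1.count '.' := by
          simp [mySplit, List.count_cons]; omega
        have h3 : (mySplit r).2 = (mySplit ('.' :: r)).2 := by simp [mySplit]
        rw [h1, h2, h3]
      · by_cases hH : c = '#'
        · subst hH
          simp only [auxAB]
          rw [if_neg (by decide), if_neg (by decide), if_pos trivial]
          rw [ih 0 0]
          simp [mySplit, tailJoin, segB']
        · simp only [auxAB]
          rw [if_neg hO, if_neg hD, if_neg hH, ih a b]
          simp [mySplit, List.count_cons, hO, hD, hH]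

theorem segB_eq (s : List Char) : segB s = segB' s := by
  simp [segB, segB', chars_count_single]

theorem intercalate_tailJoin (xs : List (List Char)) (x : List Char) :
    List.intercalate ['#'] (x :: xs.map segB') = x ++ tailJoin xs := by
  induction xs generalizing x with
  | nil => simp [List.intercalate, tailJoin]
  | cons y t ih =>
    simp only [List.map_cons, tailJoin]
    rw [show List.intercalate ['#'] (x :: segB' y :: t.map segB') =
          x ++ ['#'] ++ List.intercalate ['#'] (segB' y :: t.map segB') by
        simp [List.intercalate, List.intersperse]]
    rw [ih (segB' y)]
    simp

theorem row_eq (row : List Char) : slideRowA row = slideRowB row := by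
  show slideRowA_fin (row.foldl slideStepA ([], [], [])) = slideRowB row
  rw [show (([], [], []) : List Char × List Char × List Char) =
        (([] : List Char), List.replicate 0 'O', List.replicate 0 '.') from rfl]
  rw [foldA_eq_aux row [] 0 0, aux_eq_split row 0 0]
  unfold slideRowB
  rw [splitOn_hash]
  simp only [List.map_cons, segB_eq]
  rw [show ((mySplit row).2.map segB) = ((mySplit row).2.map segB') by
        exact List.map_congr_left fun s _ => segB_eq s]
  rw [show PySem.Chars.join ['#'] ((segB' (mySplit row).1) :: (mySplit row).2.map segB') =
        List.intercalate ['#'] ((segB' (mySplit row).1) :: (mySplit row).2.map segB') from rfl]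
  rw [intercalate_tailJoin]
  simp [segB']

-- ===== VERDICT (by name: the statement is the Claim_ definition above) =====
theorem slide_stones_left_spec : Claim_equal_slide_stones_left := by
  intro record _
  unfold Spec_slide_stones_left slide_stones_left slide_stones_left_alt
  rw [PySem.List.foldl_append_singleton_eq_map]
  exact List.map_congr_left fun row _ => by rw [row_eq]
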